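-- pv_equiv track=rewrite | github.com/AndreyMatykhin/My_Phyton_Algoritm | task_3_5.py | max_neg_element
-- ===== SOURCE A (Python) =====
-- def max_neg_element(task):
--     if task:
--         temp = -1
--         for i in range(0, len(task)):
--             if task[i] < 0 and temp == -1:
--                 temp = i
--             elif task[temp] < task[i] < 0:
--                 temp = i
--         return task[temp] if temp != -1 else None
--     else:
--         return False
-- ===== SOURCE B (Python) =====
-- def max_neg_element(task):
--     if not task:
--         return False
--     negs = [x for x in task if x < 0]
--     return max(negs) if negs else None
-- ===== Notes on version B (the rewrite author's own statement) =====
-- stated objective: simpler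
-- what changed: A tracks the index of the running best negative in one explicit index loop (with a -1 sentinel doubling as 'not found'); B filters the negatives and takes max() of the filtered list — no indices or sentinel, and the work moves into the C-level comprehension/max builtins.
-- outside the precondition, e.g. on max_neg_element([]): A returns False, B returns False
import Mathlib
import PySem

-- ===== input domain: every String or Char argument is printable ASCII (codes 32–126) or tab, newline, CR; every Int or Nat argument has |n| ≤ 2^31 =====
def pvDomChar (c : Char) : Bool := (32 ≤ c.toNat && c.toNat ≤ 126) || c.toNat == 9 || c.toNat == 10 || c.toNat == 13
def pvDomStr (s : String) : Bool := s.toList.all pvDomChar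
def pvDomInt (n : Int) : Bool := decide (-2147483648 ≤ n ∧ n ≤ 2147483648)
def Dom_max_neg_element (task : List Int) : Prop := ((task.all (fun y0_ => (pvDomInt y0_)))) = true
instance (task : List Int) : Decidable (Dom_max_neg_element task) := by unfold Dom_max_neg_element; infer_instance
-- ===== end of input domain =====

-- B replaces A's index-tracking loop (with a -1 sentinel index) by filter-the-negatives then max: simpler.
-- On the empty list A returns the Python bool False (not an int/None), so Pre_ excludes it.

-- ===== PORT A =====
-- the body of A's for-loop: temp is the tracked index (-1 = not yet found)
def pvStepA (task : List Int) (temp i : Int) : Int :=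
  if PySem.List.pyGetD task i 0 < 0 ∧ temp = -1 then i
  else if PySem.List.pyGetD task temp 0 < PySem.List.pyGetD task i 0 ∧
          PySem.List.pyGetD task i 0 < 0 then i
  else temp

def max_neg_element (task : List Int) : Option Int :=
  if task ≠ [] then
    let temp := (PySem.List.pyRange 0 (task.length : Int) 1).foldl (pvStepA task) (-1)
    if temp ≠ -1 then PySem.List.pyGet? task temp else none
  else none  -- Python returns False here (a bool, outside Option Int); excluded by Pre_

-- ===== PORT B =====
def max_neg_element_alt (task : List Int) : Option Int :=
  if task ≠ [] then
    let negs := task.filter (fun x => decide (x < 0))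
    if negs ≠ [] then PySem.List.max? negs (fun x => x) else none
  else none  -- Python returns False here; excluded by Pre_

-- ===== PRECONDITION & SPEC =====
-- Pre_ excludes only the empty list, on which A returns the bool False — not a value of Option Int.
def Pre_max_neg_element (task : List Int) : Prop := task ≠ []
instance (task : List Int) : Decidable (Pre_max_neg_element task) := by unfold Pre_max_neg_element; infer_instance
def pvWitness_max_neg_element : List Int := ([3, -1, -5])

def Spec_max_neg_element (task : List Int) (out : Option Int) : Prop := out = max_neg_element_alt task
instance (task : List Int) (out : Option Int) : Decidable (Spec_max_neg_element task out) := by unfold Spec_max_neg_element; infer_instance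

-- ===== CLAIM (what is proved, stated in full; the proofs are below) =====
def Claim_equal_max_neg_element : Prop := ∀ (task : List Int), Dom_max_neg_element task → Pre_max_neg_element task → Spec_max_neg_element task (max_neg_element task)

-- ===== LEMMAS AND PROOFS =====

theorem pvLoopInv (task : List Int) (k : Nat) (hk : k ≤ task.length) :
    (let t := (PySem.List.pyRange 0 (k : Int) 1).foldl (pvStepA task) (-1)
     (t = -1 ∧ (task.take k).filter (fun x => decide (x < 0)) = []) ∨
     (∃ j : Nat, t = (j : Int) ∧ j < k ∧
        task.getD j 0 ∈ (task.take k).filter (fun x => decide (x < 0)) ∧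
        ∀ x ∈ (task.take k).filter (fun x => decide (x < 0)), x ≤ task.getD j 0)) := by
  induction k with
  | zero => simp [PySem.List.pyRange]
  | succ k ih =>
    have hk' : k ≤ task.length := Nat.le_of_succ_le hk
    have hklt : k < task.length := hk
    have hrange : PySem.List.pyRange 0 ((k + 1 : Nat) : Int) 1
        = PySem.List.pyRange 0 (k : Int) 1 ++ [(k : Int)] := by
      push_cast
      exact PySem.List.pyRange_one_succ_right (by positivity)
    have htake : task.take (k + 1) = task.take k ++ [task[k]] := by
      rw [List.take_add_one, List.getElem?_eq_getElem hklt]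
      rfl
    have hget : PySem.List.pyGetD task (k : Int) 0 = task[k] := by
      simp [PySem.List.pyGetD_natCast, List.getD_eq_getElem?_getD, hklt]
    rw [hrange, htake, List.foldl_append, List.filter_append]
    simp only [List.foldl_cons, List.foldl_nil]
    have hgk : task.getD k 0 = task[k] := by
      simp [List.getD_eq_getElem?_getD, List.getElem?_eq_getElem hklt]
    rcases ih hk' with ⟨ht, hfilt⟩ | ⟨j, ht, hjk, hmem, hmax⟩
    · rw [ht, hfilt]
      by_cases hneg : task[k] < 0
      · -- first branch fires: temp := k
        right
        refine ⟨k, ?_, Nat.lt_succ_self k, ?_, ?_⟩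
        · simp [pvStepA, hget, hneg]
        · rw [hgk]; simp [hneg]
        · intro x hx
          simp [hneg] at hx
          rw [hgk, hx]
      · -- nothing fires
        left
        constructor
        · simp [pvStepA, hget, hneg]
        · simp [hneg]
    · have htne : (PySem.List.pyRange 0 (k : Int) 1).foldl (pvStepA task) (-1) ≠ -1 := by
        rw [ht]; omega
      have hgj : PySem.List.pyGetD task ((j : Nat) : Int) 0 = task.getD j 0 := by
        simp [PySem.List.pyGetD_natCast]
      by_cases hupd : task.getD j 0 < task[k] ∧ task[k] < 0
      · right
        refine ⟨k, ?_, Nat.lt_succ_self k, ?_, ?_⟩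
        · rw [ht]
          simp only [pvStepA, hget, hgj]
          rw [if_neg (by omega), if_pos (by exact hupd)]
        · rw [hgk]; simp [hupd.2]
        · intro x hx
          rw [hgk]
          rcases List.mem_append.1 hx with hx | hx
          · exact le_trans (hmax x hx) (le_of_lt hupd.1)
          · simp [hupd.2] at hx
            rw [hx]
      · right
        refine ⟨j, ?_, Nat.lt_succ_of_lt hjk, ?_, ?_⟩
        · rw [ht]
          simp only [pvStepA, hget, hgj]
          rw [if_neg (by omega), if_neg (by exact hupd)]
        · exact List.mem_append_left _ hmem
        · intro x hx
          rcases List.mem_append.1 hx with hx | hx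
          · exact hmax x hx
          · by_cases hneg : task[k] < 0
            · simp [hneg] at hx
              subst hx
              omega
            · simp [hneg] at hx

theorem max_neg_element_spec : Claim_equal_max_neg_element := by
  intro task hdom hpre
  have hpre' : task ≠ [] := hpre
  simp only [Spec_max_neg_element, max_neg_element, max_neg_element_alt, ne_eq, hpre',
    not_false_eq_true, if_true]
  have hinv := pvLoopInv task task.length le_rfl
  simp only [List.take_length] at hinv
  rcases hinv with ⟨ht, hfilt⟩ | ⟨j, ht, hjk, hmem, hmax⟩
  · rw [ht, hfilt]
    simp
  · rw [ht]
    have hne : task.filter (fun x => decide (x < 0)) ≠ [] := by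
      intro h; rw [h] at hmem; exact List.not_mem_nil hmem
    rw [if_pos (show ((j : Nat) : Int) ≠ -1 by omega), if_pos hne]
    rcases hm : PySem.List.max? (task.filter (fun x => decide (x < 0))) (fun x => x) with _ | m
    · exact absurd ((PySem.List.max?_eq_none_iff _ _).1 hm) hne
    · have hmmem := PySem.List.max?_mem hm
      have hmmax := PySem.List.max?_isMax hm
      have h1 : m ≤ task.getD j 0 := hmax m hmmem
      have h2 : task.getD j 0 ≤ m := hmmax _ hmem
      have heq : task.getD j 0 = m := le_antisymm h2 h1
      rw [List.getD_eq_getElem?_getD, List.getElem?_eq_getElem hjk, Option.getD_some] at heq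
      rw [PySem.List.pyGet?_natCast, List.getElem?_eq_getElem hjk, heq]
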